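-- pv_equiv track=rewrite | github.com/rlogger/code | max_subarrays.py | maxSubarrays
-- ===== SOURCE A (Python) =====
-- def maxSubarrays(n, conflictingPairs):
--     total = n * (n + 1) // 2  # Total number of subarrays
--
--     def countInvalidSubarrays(pairs):
--         """Count subarrays that contain both elements of at least one pair"""
--         invalid = set()
--
--         for a, b in pairs:
--             if a > b:
--                 a, b = b, a
--             # Subarrays containing both a and b:
--             # Start from [1..a] and end at [b..n]
--             for start in range(1, a + 1):
--                 for end in range(b, n + 1):
--                     invalid.add((start, end))
--
--         return len(invalid)
--
--     maxValid = 0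
--
--     for idx in range(len(conflictingPairs)):
--         remaining = conflictingPairs[:idx] + conflictingPairs[idx + 1 :]
--         invalid = countInvalidSubarrays(remaining)
--         valid = total - invalid
--         maxValid = max(maxValid, valid)
--
--     return maxValid
-- ===== SOURCE B (Python) =====
-- def maxSubarrays(n, conflictingPairs):
--     total = n * (n + 1) // 2  # Total number of subarrays
--
--     def countInvalidSubarrays(pairs):
--         """Arithmetic count: for each start s, the invalid ends form the
--         interval [m(s), n] where m(s) is the least (normalized) b among
--         pairs whose a is >= s; no set of (start, end) pairs is ever built."""
--         norm = [(b, a) if a > b else (a, b) for a, b in pairs]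
--         good = [(a, b) for a, b in norm if a >= 1 and b <= n]
--         if not good:
--             return 0
--         amax = max(a for a, b in good)
--         inv = 0
--         for s in range(1, amax + 1):
--             m = min(b for a, b in good if a >= s)
--             inv += n - m + 1
--         return inv
--
--     maxValid = 0
--     for idx in range(len(conflictingPairs)):
--         remaining = conflictingPairs[:idx] + conflictingPairs[idx + 1:]
--         maxValid = max(maxValid, total - countInvalidSubarrays(remaining))
--     return maxValid
-- ===== Notes on version B (the rewrite author's own statement) =====
-- stated objective: faster
-- what changed: Instead of materialising every invalid (start,end) pair into a set and taking its length, B counts invalid subarrays arithmetically: for each start s the invalid ends are exactly the interval [m(s), n] with m(s) the minimum normalized b over pairs whose a >= s, so it sums n - m(s) + 1 per start.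
import Mathlib
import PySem

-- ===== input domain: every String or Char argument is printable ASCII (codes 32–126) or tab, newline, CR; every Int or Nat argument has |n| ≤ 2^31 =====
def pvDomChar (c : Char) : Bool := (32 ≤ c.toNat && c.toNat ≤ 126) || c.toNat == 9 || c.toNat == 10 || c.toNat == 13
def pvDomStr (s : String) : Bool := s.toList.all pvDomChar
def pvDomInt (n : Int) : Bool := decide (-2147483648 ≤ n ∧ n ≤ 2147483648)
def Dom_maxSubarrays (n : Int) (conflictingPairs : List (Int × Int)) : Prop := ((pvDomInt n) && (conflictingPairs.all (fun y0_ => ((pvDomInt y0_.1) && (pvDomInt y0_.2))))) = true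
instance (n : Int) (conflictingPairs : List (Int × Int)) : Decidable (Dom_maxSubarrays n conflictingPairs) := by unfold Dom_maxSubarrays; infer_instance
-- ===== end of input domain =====

-- B replaces A's enumeration of every invalid (start, end) pair into a set by an arithmetic
-- per-start count (for each start s the invalid ends are exactly the interval [m(s), n]).

-- ===== PORT A =====
-- `if a > b: a, b = b, a`
def pvNormA (p : Int × Int) : Int × Int := if p.1 > p.2 then (p.2, p.1) else p

-- the body of A's `for a, b in pairs` loop: two nested `for` loops adding (start, end) to the set
def pvAddPair (n : Int) (inv : PySem.Set (Int × Int)) (p : Int × Int) : PySem.Set (Int × Int) :=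
  let q := pvNormA p
  (PySem.List.pyRange 1 (q.1 + 1) 1).foldl (fun inv s =>
    (PySem.List.pyRange q.2 (n + 1) 1).foldl (fun inv e => PySem.Set.add inv (s, e)) inv) inv

-- A's countInvalidSubarrays: build the set `invalid`, return its len
def pvCountInvalidA (n : Int) (pairs : List (Int × Int)) : Int :=
  PySem.Set.len (pairs.foldl (pvAddPair n) PySem.Set.empty)

def maxSubarrays (n : Int) (conflictingPairs : List (Int × Int)) : Int :=
  let total := PySem.Int.floordiv (n * (n + 1)) 2
  (PySem.List.pyRange 0 (conflictingPairs.length : Int) 1).foldl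
    (fun maxValid idx =>
      let remaining := PySem.List.slice conflictingPairs none (some idx) ++
                       PySem.List.slice conflictingPairs (some (idx + 1)) none
      max maxValid (total - pvCountInvalidA n remaining)) 0

-- ===== PORT B =====
-- `(b, a) if a > b else (a, b)`
def pvNormB (p : Int × Int) : Int × Int := if p.1 > p.2 then (p.2, p.1) else p

-- `min(b for a, b in good if a >= s)`; the default 0 is never used: whenever B evaluates
-- this, some pair of `good` has first component ≥ s, so the generator is nonempty
def pvMinB (good : List (Int × Int)) (s : Int) : Int :=
  (PySem.List.min? ((good.filter (fun q => decide (s ≤ q.1))).map (·.2)) (fun b => b)).getD 0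

-- B's countInvalidSubarrays: per-start arithmetic count, no set is built
def pvCountInvalidB (n : Int) (pairs : List (Int × Int)) : Int :=
  let norm := pairs.map pvNormB
  let good := norm.filter (fun q => decide (1 ≤ q.1) && decide (q.2 ≤ n))
  match good with
  | [] => 0
  | g :: gs =>
      let amax := gs.foldl (fun acc q => max acc q.1) g.1
      (PySem.List.pyRange 1 (amax + 1) 1).foldl
        (fun inv s => inv + (n - pvMinB (g :: gs) s + 1)) 0

def maxSubarrays_alt (n : Int) (conflictingPairs : List (Int × Int)) : Int :=
  let total := PySem.Int.floordiv (n * (n + 1)) 2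
  (PySem.List.pyRange 0 (conflictingPairs.length : Int) 1).foldl
    (fun maxValid idx =>
      let remaining := PySem.List.slice conflictingPairs none (some idx) ++
                       PySem.List.slice conflictingPairs (some (idx + 1)) none
      max maxValid (total - pvCountInvalidB n remaining)) 0

-- ===== PRECONDITION & SPEC =====
def Spec_maxSubarrays (n : Int) (conflictingPairs : List (Int × Int)) (out : Int) : Prop := out = maxSubarrays_alt n conflictingPairs
instance (n : Int) (conflictingPairs : List (Int × Int)) (out : Int) : Decidable (Spec_maxSubarrays n conflictingPairs out) := by unfold Spec_maxSubarrays; infer_instance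

-- ===== CLAIM (what is proved, stated in full; the proofs are below) =====
def Claim_equal_maxSubarrays : Prop := ∀ (n : Int) (conflictingPairs : List (Int × Int)), Dom_maxSubarrays n conflictingPairs → Spec_maxSubarrays n conflictingPairs (maxSubarrays n conflictingPairs)

-- ===== LEMMAS AND PROOFS =====

theorem pvNormB_eq_pvNormA : pvNormB = pvNormA := rfl

/-- A `foldl` whose step's membership is characterised pointwise by `P`. -/
theorem pv_mem_foldl_iff {β : Type} (step : PySem.Set (Int × Int) → β → PySem.Set (Int × Int))
    (P : β → Int × Int → Prop)
    (hstep : ∀ s y x, x ∈ step s y ↔ x ∈ s ∨ P y x) :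
    ∀ (l : List β) (init : PySem.Set (Int × Int)) (x : Int × Int),
      x ∈ l.foldl step init ↔ x ∈ init ∨ ∃ y ∈ l, P y x := by
  intro l
  induction l with
  | nil => intro init x; simp
  | cons a t ih =>
    intro init x
    simp only [List.foldl_cons, ih, hstep, List.mem_cons]
    constructor
    · rintro ((h | h) | ⟨y, hy, hP⟩)
      · exact Or.inl h
      · exact Or.inr ⟨a, Or.inl rfl, h⟩
      · exact Or.inr ⟨y, Or.inr hy, hP⟩
    · rintro (h | ⟨y, (rfl | hy), hP⟩)
      · exact Or.inl (Or.inl h)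
      · exact Or.inl (Or.inr hP)
      · exact Or.inr ⟨y, hy, hP⟩

theorem pv_mem_inner (s0 b c : Int) (inv : PySem.Set (Int × Int)) (x : Int × Int) :
    x ∈ (PySem.List.pyRange b c 1).foldl (fun inv e => PySem.Set.add inv (s0, e)) inv ↔
      x ∈ inv ∨ (x.1 = s0 ∧ b ≤ x.2 ∧ x.2 < c) := by
  rw [pv_mem_foldl_iff _ (fun e x => x = (s0, e)) (fun s e x => PySem.Set.mem_add s (s0, e) x)]
  refine or_congr Iff.rfl ?_
  constructor
  · rintro ⟨e, he, rfl⟩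
    rw [PySem.List.mem_pyRange_one] at he
    exact ⟨rfl, he.1, he.2⟩
  · rintro ⟨h1, h2, h3⟩
    refine ⟨x.2, PySem.List.mem_pyRange_one.mpr ⟨h2, h3⟩, ?_⟩
    rw [← h1]

theorem pv_mem_mid (n a b : Int) (inv : PySem.Set (Int × Int)) (x : Int × Int) :
    x ∈ (PySem.List.pyRange 1 (a + 1) 1).foldl (fun inv s =>
          (PySem.List.pyRange b (n + 1) 1).foldl (fun inv e => PySem.Set.add inv (s, e)) inv) inv ↔
      x ∈ inv ∨ (1 ≤ x.1 ∧ x.1 ≤ a ∧ b ≤ x.2 ∧ x.2 ≤ n) := by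
  rw [pv_mem_foldl_iff _ (fun s x => x.1 = s ∧ b ≤ x.2 ∧ x.2 < n + 1)
        (fun inv' s x => pv_mem_inner s b (n + 1) inv' x)]
  refine or_congr Iff.rfl ?_
  constructor
  · rintro ⟨s, hs, h1, h2, h3⟩
    rw [PySem.List.mem_pyRange_one] at hs
    omega
  · rintro ⟨h1, h2, h3, h4⟩
    exact ⟨x.1, PySem.List.mem_pyRange_one.mpr ⟨h1, by omega⟩, rfl, h3, by omega⟩

theorem pv_mem_addPair (n : Int) (inv : PySem.Set (Int × Int)) (p : Int × Int) (x : Int × Int) :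
    x ∈ pvAddPair n inv p ↔
      x ∈ inv ∨ (1 ≤ x.1 ∧ x.1 ≤ (pvNormA p).1 ∧ (pvNormA p).2 ≤ x.2 ∧ x.2 ≤ n) := by
  simp only [pvAddPair]
  exact pv_mem_mid n (pvNormA p).1 (pvNormA p).2 inv x

/-- Membership in the set A builds. -/
theorem pv_mem_setA (n : Int) (pairs : List (Int × Int)) (x : Int × Int) :
    x ∈ pairs.foldl (pvAddPair n) PySem.Set.empty ↔
      ∃ p ∈ pairs, 1 ≤ x.1 ∧ x.1 ≤ (pvNormA p).1 ∧ (pvNormA p).2 ≤ x.2 ∧ x.2 ≤ n := by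
  rw [pv_mem_foldl_iff (pvAddPair n)
        (fun p x => 1 ≤ x.1 ∧ x.1 ≤ (pvNormA p).1 ∧ (pvNormA p).2 ≤ x.2 ∧ x.2 ≤ n)
        (fun s p x => pv_mem_addPair n s p x)]
  simp [PySem.Set.empty]

/-- A fold of nodup-preserving steps preserves `Nodup`. -/
theorem pv_nodup_foldl {β : Type} (step : PySem.Set (Int × Int) → β → PySem.Set (Int × Int))
    (hstep : ∀ s y, s.Nodup → (step s y).Nodup) :
    ∀ (l : List β) (init : PySem.Set (Int × Int)), init.Nodup → (l.foldl step init).Nodup := by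
  intro l
  induction l with
  | nil => intro init h; simpa using h
  | cons a t ih => intro init h; exact ih _ (hstep _ _ h)

theorem pv_nodup_setA (n : Int) (pairs : List (Int × Int)) :
    (pairs.foldl (pvAddPair n) PySem.Set.empty).Nodup := by
  apply pv_nodup_foldl
  · intro s p hs
    simp only [pvAddPair]
    apply pv_nodup_foldl _ ?_ _ _ hs
    intro s' y hs'
    apply pv_nodup_foldl _ ?_ _ _ hs'
    intro s'' e hs''
    exact PySem.Set.nodup_add s'' (y, e) hs''
  · simp [PySem.Set.empty]

/-- Membership in A's set, phrased through B's `good` list. -/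
theorem pv_mem_setA_good (n : Int) (pairs : List (Int × Int)) (x : Int × Int) :
    x ∈ pairs.foldl (pvAddPair n) PySem.Set.empty ↔
      ∃ q ∈ (pairs.map pvNormB).filter (fun q => decide (1 ≤ q.1) && decide (q.2 ≤ n)),
        1 ≤ x.1 ∧ x.1 ≤ q.1 ∧ q.2 ≤ x.2 ∧ x.2 ≤ n := by
  rw [pv_mem_setA]
  constructor
  · rintro ⟨p, hp, h1, h2, h3, h4⟩
    refine ⟨pvNormA p, List.mem_filter.mpr ⟨?_, ?_⟩, h1, h2, h3, h4⟩
    · exact List.mem_map.mpr ⟨p, hp, by rw [pvNormB_eq_pvNormA]⟩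
    · simp only [Bool.and_eq_true, decide_eq_true_eq]
      omega
  · rintro ⟨q, hq, h1, h2, h3, h4⟩
    rcases List.mem_map.1 (List.mem_filter.1 hq).1 with ⟨p, hp, rfl⟩
    rw [pvNormB_eq_pvNormA] at h2 h3
    exact ⟨p, hp, h1, h2, h3, h4⟩

/-- `pvMinB good s` is the least second component among pairs with first component ≥ s
(when there is one). -/
theorem pv_minB_spec (good : List (Int × Int)) (s : Int) (hne : ∃ q ∈ good, s ≤ q.1) :
    (∃ q ∈ good, s ≤ q.1 ∧ q.2 = pvMinB good s) ∧
      ∀ q ∈ good, s ≤ q.1 → pvMinB good s ≤ q.2 := by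
  cases hm : PySem.List.min? ((good.filter (fun q => decide (s ≤ q.1))).map (·.2)) (fun b => b) with
  | none =>
    exfalso
    rw [PySem.List.min?_eq_none_iff] at hm
    rcases hne with ⟨q, hq, hsq⟩
    have hmem : q.2 ∈ (good.filter (fun q => decide (s ≤ q.1))).map (·.2) :=
      List.mem_map_of_mem (List.mem_filter.mpr ⟨hq, by simpa using hsq⟩)
    rw [hm] at hmem
    simp at hmem
  | some m =>
    have hpv : pvMinB good s = m := by unfold pvMinB; rw [hm]; rfl
    have hmem := PySem.List.min?_mem hm
    have hmin := PySem.List.min?_isMin hm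
    simp only [List.mem_map, List.mem_filter, decide_eq_true_eq] at hmem
    rcases hmem with ⟨q, ⟨hq, hsq⟩, hq2⟩
    constructor
    · exact ⟨q, hq, hsq, by rw [hpv, hq2]⟩
    · intro q' hq' hsq'
      have hb : q'.2 ∈ (good.filter (fun q => decide (s ≤ q.1))).map (·.2) :=
        List.mem_map_of_mem (List.mem_filter.mpr ⟨hq', by simpa using hsq'⟩)
      have := hmin q'.2 hb
      rw [hpv]
      exact this

theorem pv_sum_range (m : Nat) (f : Nat → Int) :
    ((List.range m).map f).sum = ∑ k ∈ Finset.range m, f k := by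
  induction m with
  | zero => simp
  | succ m ih =>
    rw [List.range_succ, Finset.sum_range_succ, List.map_append, List.sum_append, ih]
    simp

/-- Central counting lemma: the length of a nodup list whose members are exactly the pairs
`(s, e)` with `1 ≤ s ≤ amax` and `m(s) ≤ e ≤ n` equals B's arithmetic sum. -/
theorem pv_len_eq (n : Int) (S : List (Int × Int)) (g : Int × Int) (gs : List (Int × Int))
    (hb : ∀ q ∈ g :: gs, 1 ≤ q.1 ∧ q.2 ≤ n)
    (hnd : S.Nodup)
    (hmem : ∀ x : Int × Int, x ∈ S ↔
      ∃ q ∈ g :: gs, 1 ≤ x.1 ∧ x.1 ≤ q.1 ∧ q.2 ≤ x.2 ∧ x.2 ≤ n) :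
    (S.length : Int) =
      (PySem.List.pyRange 1 ((gs.foldl (fun acc q => max acc q.1) g.1) + 1) 1).foldl
        (fun inv s => inv + (n - pvMinB (g :: gs) s + 1)) 0 := by
  set A := gs.foldl (fun acc q => max acc q.1) g.1 with hA
  have hmax := PySem.List.le_foldl_max_int gs (fun q => q.1) g.1
  have hub : ∀ q ∈ g :: gs, q.1 ≤ A := by
    intro q hq
    rcases List.mem_cons.1 hq with rfl | hq
    · exact hmax.1
    · exact hmax.2 q hq
  have hA' : A = (gs.map (fun q => q.1)).foldl max g.1 := by rw [hA, List.foldl_map]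
  have hAmem : ∃ q ∈ g :: gs, q.1 = A := by
    rcases PySem.List.foldl_max_mem (gs.map (fun q => q.1)) g.1 with h | h
    · exact ⟨g, List.mem_cons_self, by rw [hA', h]⟩
    · rcases List.mem_map.1 h with ⟨q, hq, hq1⟩
      exact ⟨q, List.mem_cons_of_mem _ hq, by rw [hA', ← hq1]⟩
  have h1A : (1 : Int) ≤ A :=
    le_trans (hb g (List.mem_cons_self)).1 (hub g (List.mem_cons_self))
  have hMs : ∀ s : Int, 1 ≤ s → s ≤ A →
      (∃ q ∈ g :: gs, s ≤ q.1 ∧ q.2 = pvMinB (g :: gs) s) ∧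
        ∀ q ∈ g :: gs, s ≤ q.1 → pvMinB (g :: gs) s ≤ q.2 := by
    intro s _ hsA
    apply pv_minB_spec
    rcases hAmem with ⟨q0, hq0, hq0A⟩
    exact ⟨q0, hq0, by omega⟩
  have hMn : ∀ s : Int, 1 ≤ s → s ≤ A → pvMinB (g :: gs) s ≤ n := by
    intro s h1 h2
    rcases (hMs s h1 h2).1 with ⟨q, hq, _, hq2⟩
    rw [← hq2]
    exact (hb q hq).2
  have hmem' : ∀ x : Int × Int, x ∈ S ↔
      1 ≤ x.1 ∧ x.1 ≤ A ∧ pvMinB (g :: gs) x.1 ≤ x.2 ∧ x.2 ≤ n := by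
    intro x
    rw [hmem]
    constructor
    · rintro ⟨q, hq, h1, h2, h3, h4⟩
      have hxA : x.1 ≤ A := le_trans h2 (hub q hq)
      exact ⟨h1, hxA, le_trans ((hMs x.1 h1 hxA).2 q hq h2) h3, h4⟩
    · rintro ⟨h1, h2, h3, h4⟩
      rcases (hMs x.1 h1 h2).1 with ⟨q, hq, hsq, hq2⟩
      exact ⟨q, hq, h1, hsq, by omega, h4⟩
  have hT : S.toFinset = (Finset.range A.toNat).biUnion
      (fun k => ({((1 : Int) + k)} : Finset Int) ×ˢ Finset.Icc (pvMinB (g :: gs) (1 + k)) n) := by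
    ext x
    obtain ⟨x1, x2⟩ := x
    simp only [List.mem_toFinset, hmem', Finset.mem_biUnion, Finset.mem_range,
      Finset.mem_product, Finset.mem_singleton, Finset.mem_Icc]
    constructor
    · rintro ⟨h1, h2, h3, h4⟩
      refine ⟨(x1 - 1).toNat, by omega, by omega, ?_, h4⟩
      have e : (1 : Int) + ((x1 - 1).toNat : Int) = x1 := by omega
      rw [e]
      exact h3
    · rintro ⟨k, hk, hx1, hx2, h4⟩
      refine ⟨by omega, by omega, ?_, h4⟩
      rw [hx1]
      exact hx2
  have hdisj : (↑(Finset.range A.toNat) : Set ℕ).PairwiseDisjoint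
      (fun k : ℕ => ({((1 : Int) + k)} : Finset Int) ×ˢ Finset.Icc (pvMinB (g :: gs) (1 + k)) n) := by
    intro i _ j _ hij
    simp only [Function.onFun]
    rw [Finset.disjoint_left]
    rintro ⟨a, b⟩ ha hb
    simp only [Finset.mem_product, Finset.mem_singleton] at ha hb
    have h1 := ha.1
    have h2 := hb.1
    apply hij
    omega
  have hpc : ∀ k : ℕ, (({((1 : Int) + k)} : Finset Int) ×ˢ
      Finset.Icc (pvMinB (g :: gs) (1 + k)) n).card = (n + 1 - pvMinB (g :: gs) (1 + k)).toNat := by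
    intro k
    rw [Finset.card_product, Finset.card_singleton, one_mul, Int.card_Icc]
  rw [PySem.List.foldl_add, PySem.List.pyRange_one]
  have hA1 : A + 1 - 1 = A := by ring
  rw [hA1, List.map_map, pv_sum_range, zero_add]
  rw [← List.toFinset_card_of_nodup hnd, hT, Finset.card_biUnion hdisj, Nat.cast_sum]
  apply Finset.sum_congr rfl
  intro k hk
  have hk' : k < A.toNat := Finset.mem_range.1 hk
  have hkA : (1 : Int) + k ≤ A := by omega
  have h1k : (1 : Int) ≤ 1 + k := by omega
  have hle := hMn (1 + k) h1k hkA
  rw [hpc k, Int.toNat_of_nonneg (by omega)]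
  simp only [Function.comp]
  ring

/-- The core: A's set length equals B's arithmetic count. -/
theorem pv_count_eq (n : Int) (pairs : List (Int × Int)) :
    pvCountInvalidA n pairs = pvCountInvalidB n pairs := by
  simp only [pvCountInvalidA, pvCountInvalidB]
  have hlen0 : PySem.Set.len (pairs.foldl (pvAddPair n) PySem.Set.empty) =
      ((pairs.foldl (pvAddPair n) PySem.Set.empty).length : Int) := by
    simp [PySem.Set.len]
  cases hg : (pairs.map pvNormB).filter (fun q => decide (1 ≤ q.1) && decide (q.2 ≤ n)) with
  | nil =>
    have hS : pairs.foldl (pvAddPair n) PySem.Set.empty = [] := by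
      rw [List.eq_nil_iff_forall_not_mem]
      intro x hx
      rcases (pv_mem_setA_good n pairs x).1 hx with ⟨q, hq, _⟩
      rw [hg] at hq
      simp at hq
    rw [hlen0, hS]
    rfl
  | cons g gs =>
    have hb : ∀ q ∈ g :: gs, 1 ≤ q.1 ∧ q.2 ≤ n := by
      intro q hq
      rw [← hg] at hq
      have := (List.mem_filter.1 hq).2
      simp only [Bool.and_eq_true, decide_eq_true_eq] at this
      exact this
    have hmem : ∀ x : Int × Int, x ∈ pairs.foldl (pvAddPair n) PySem.Set.empty ↔
        ∃ q ∈ g :: gs, 1 ≤ x.1 ∧ x.1 ≤ q.1 ∧ q.2 ≤ x.2 ∧ x.2 ≤ n := by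
      intro x
      rw [pv_mem_setA_good, hg]
    have hmain := pv_len_eq n (pairs.foldl (pvAddPair n) PySem.Set.empty) g gs hb
      (pv_nodup_setA n pairs) hmem
    rw [hlen0]
    exact hmain

-- ===== VERDICT (by name: the statement is the Claim_ definition above) =====
theorem maxSubarrays_spec : Claim_equal_maxSubarrays := by
  intro n pairs _
  show maxSubarrays n pairs = maxSubarrays_alt n pairs
  unfold maxSubarrays maxSubarrays_alt
  simp only [pv_count_eq]
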